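-- pv_equiv track=rewrite | github.com/NahinM/CSE331 | Checkers/python/package/CheckerFuns/checkerFun_kkp_Fall25.py | question22
-- ===== SOURCE A (Python) =====
-- def question22(L:str) -> bool:
--     L = L[-1::-1]
--     i = 0
--     while i<len(L) and L[i]=='1': i+=1
--     if i==len(L): return True
--     zero = 0
--     while i<len(L) and L[i]=='0':
--         zero+=1
--         i+=1
--     if i==len(L) or zero>=2: return True
--     one = 0
--     while i<len(L) and L[i]=='1':
--         i+=1
--         one+=1
--     if i==len(L): return True
--     return one%2==0
-- ===== SOURCE B (Python) =====
-- def question22(L: str) -> bool: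
--     # One forward pass: run-length encode L, then inspect the runs of the
--     # reversed string (= the reversed run list) instead of re-scanning.
--     runs = []
--     for c in L:
--         if runs and runs[-1][0] == c:
--             runs[-1] = (c, runs[-1][1] + 1)
--         else:
--             runs.append((c, 1))
--     runs.reverse()
--     if runs and runs[0][0] == '1':
--         runs = runs[1:]  # the trailing ones-run of L is always accepted
--     if len(runs) >= 3:
--         (c0, n0), (c1, n1) = runs[0], runs[1]
--         return not (c0 == '0' and n0 == 1 and c1 == '1' and n1 % 2 == 1)
--     return True
-- ===== Notes on version B (the rewrite author's own statement) =====
-- stated objective: alternative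
-- what changed: A scans the reversed string with three sequential index-based while loops (skip ones, count zeros, count ones); B instead run-length-encodes the string in one forward pass and decides the answer by inspecting the first runs of the reversed run list positionally.
import Mathlib
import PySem

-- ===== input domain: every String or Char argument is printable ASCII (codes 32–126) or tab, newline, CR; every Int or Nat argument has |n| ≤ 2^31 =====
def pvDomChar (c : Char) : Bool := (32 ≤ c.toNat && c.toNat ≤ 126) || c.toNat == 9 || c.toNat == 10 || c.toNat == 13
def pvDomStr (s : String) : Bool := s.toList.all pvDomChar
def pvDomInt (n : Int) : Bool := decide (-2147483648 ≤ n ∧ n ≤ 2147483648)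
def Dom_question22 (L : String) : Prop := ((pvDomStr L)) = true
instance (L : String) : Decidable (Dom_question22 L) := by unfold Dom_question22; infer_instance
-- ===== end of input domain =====

-- B replaces A's three sequential index-scans over the reversed string by one forward
-- run-length-encoding pass whose run list is then inspected positionally (objective: alternative).


-- ===== PORT A =====
-- while i<len(L) and L[i]=='1': i+=1   (consumes the leading '1's)
def q22skip1 : List Char → List Char
  | [] => []
  | c :: cs => if c = '1' then q22skip1 cs else c :: cs

-- while i<len(L) and L[i]=='0': zero+=1; i+=1   (returns (zero, rest))
def q22count0 : List Char → Int × List Char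
  | [] => (0, [])
  | c :: cs => if c = '0' then let p := q22count0 cs; (p.1 + 1, p.2) else (0, c :: cs)

-- while i<len(L) and L[i]=='1': i+=1; one+=1   (returns (one, rest))
def q22count1 : List Char → Int × List Char
  | [] => (0, [])
  | c :: cs => if c = '1' then let p := q22count1 cs; (p.1 + 1, p.2) else (0, c :: cs)

def q22A (R : List Char) : Bool :=
  let R1 := q22skip1 R
  if R1 = [] then true
  else
    let p := q22count0 R1
    if p.2 = [] ∨ p.1 ≥ 2 then true
    else
      let q := q22count1 p.2
      if q.2 = [] then true
      else q.1 % 2 == 0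

def question22 (L : String) : Bool :=
  q22A (L.toList.reverse)    -- L = L[-1::-1]

-- ===== PORT B =====
-- the loop body: merge c into the last run or start a new run
def q22step (acc : List (Char × Int)) (c : Char) : List (Char × Int) :=
  match acc.getLast? with
  | some (c0, n) => if c0 = c then acc.dropLast ++ [(c, n + 1)] else acc ++ [(c, 1)]
  | none => [(c, 1)]

-- if runs and runs[0][0] == '1': runs = runs[1:]
def q22Bdrop : List (Char × Int) → List (Char × Int)
  | (c0, n0) :: rest => if c0 = '1' then rest else (c0, n0) :: rest
  | [] => []

-- if len(runs) >= 3: return not (...) ; return True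
def q22Bcore : List (Char × Int) → Bool
  | (c0, n0) :: (c1, n1) :: _ :: _ => !(c0 == '0' && n0 == 1 && c1 == '1' && n1 % 2 == 1)
  | _ => true

def q22B (runs : List (Char × Int)) : Bool := q22Bcore (q22Bdrop runs)

def question22_alt (L : String) : Bool :=
  q22B ((L.toList.foldl q22step []).reverse)

-- ===== PRECONDITION & SPEC =====
def Spec_question22 (L : String) (out : Bool) : Prop := out = question22_alt L
instance (L : String) (out : Bool) : Decidable (Spec_question22 L out) := by unfold Spec_question22; infer_instance

-- ===== CLAIM (what is proved, stated in full; the proofs are below) =====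
def Claim_equal_question22 : Prop := ∀ (L : String), Dom_question22 L → Spec_question22 L (question22 L)

-- ===== LEMMAS AND PROOFS =====

-- front-cons run-length encoding (proof-only helper)
def q22consRun (c : Char) : List (Char × Int) → List (Char × Int)
  | [] => [(c, 1)]
  | (c0, n) :: rest => if c0 = c then (c0, n + 1) :: rest else (c, 1) :: (c0, n) :: rest

def q22rle : List Char → List (Char × Int)
  | [] => []
  | c :: cs => q22consRun c (q22rle cs)

theorem q22step_reverse (acc : List (Char × Int)) (c : Char) :
    (q22step acc c).reverse = q22consRun c acc.reverse := by
  induction acc using List.reverseRecOn with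
  | nil => simp [q22step, q22consRun]
  | append_singleton as a ih =>
    obtain ⟨c0, n⟩ := a
    by_cases h : c0 = c <;> simp [q22step, q22consRun, h]

theorem q22foldl_reverse (cs : List Char) : ∀ (acc : List (Char × Int)),
    (List.foldl q22step acc cs).reverse = List.foldl (fun r c => q22consRun c r) acc.reverse cs := by
  induction cs with
  | nil => intro acc; rfl
  | cons c cs ih =>
    intro acc
    simp only [List.foldl]
    rw [ih, q22step_reverse]

theorem q22rle_foldr (cs : List Char) : q22rle cs = List.foldr q22consRun [] cs := by
  induction cs with
  | nil => rfl
  | cons c cs ih => simp [q22rle, ih]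

theorem q22runs_eq (cs : List Char) :
    (List.foldl q22step [] cs).reverse = q22rle cs.reverse := by
  rw [q22foldl_reverse, q22rle_foldr, ← List.foldl_reverse]
  simp

theorem q22consRun_ne_nil (c : Char) (rs : List (Char × Int)) : q22consRun c rs ≠ [] := by
  cases rs with
  | nil => simp [q22consRun]
  | cons a rest => obtain ⟨c0, n⟩ := a; by_cases h : c0 = c <;> simp [q22consRun, h]

theorem q22rle_nil_iff (R : List Char) : q22rle R = [] ↔ R = [] := by
  cases R with
  | nil => simp [q22rle]
  | cons c cs => simpa [q22rle] using q22consRun_ne_nil c (q22rle cs)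

theorem q22rle_decomp (R : List Char) : ∀ (c : Char) (n : Int) (rest : List (Char × Int)),
    q22rle R = (c, n) :: rest →
    ∃ (k : ℕ) (S : List Char), 0 < k ∧ n = (k : Int) ∧ R = List.replicate k c ++ S ∧
      q22rle S = rest ∧ ∀ d ∈ S.head?, d ≠ c := by
  induction R with
  | nil => intro c n rest h; simp [q22rle] at h
  | cons a R' ih =>
    intro c n rest h
    simp only [q22rle] at h
    cases h' : q22rle R' with
    | nil =>
      have hR' : R' = [] := (q22rle_nil_iff R').mp h'
      rw [h'] at h
      simp only [q22consRun, List.cons.injEq, Prod.mk.injEq] at h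
      obtain ⟨⟨hc, hn⟩, hrest⟩ := h
      exact ⟨1, [], by omega, by omega, by simp [hc.symm, hR'], by simp [hrest.symm, q22rle], by simp⟩
    | cons b rest0 =>
      obtain ⟨c0, n0⟩ := b
      rw [h'] at h
      obtain ⟨k0, S0, hk0, hn0, hR', hS0, hhd⟩ := ih c0 n0 rest0 h'
      by_cases hc0 : c0 = a
      · simp only [q22consRun, if_pos hc0, List.cons.injEq, Prod.mk.injEq] at h
        obtain ⟨⟨h1, h2⟩, h3⟩ := h
        refine ⟨k0 + 1, S0, by omega, by omega, ?_, by rw [← h3]; exact hS0, ?_⟩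
        · rw [hR', ← h1, hc0]
          simp [List.replicate_succ]
        · intro d hd
          exact h1 ▸ hhd d hd
      · simp only [q22consRun, if_neg hc0, List.cons.injEq, Prod.mk.injEq] at h
        obtain ⟨⟨h1, h2⟩, h3⟩ := h
        refine ⟨1, R', by omega, by omega, by simp [h1], by rw [← h3, h'], ?_⟩
        intro d hd
        rw [hR'] at hd
        cases k0 with
        | zero => omega
        | succ k =>
          simp [List.replicate_succ] at hd
          subst hd
          intro he
          exact hc0 (by rw [he, h1])

theorem q22count0_run (k : ℕ) (S : List Char) (h : ∀ d ∈ S.head?, d ≠ '0') :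
    q22count0 (List.replicate k '0' ++ S) = ((k : Int), S) := by
  induction k with
  | zero =>
    cases S with
    | nil => simp [q22count0]
    | cons c cs =>
      have : c ≠ '0' := h c (by simp)
      simp [q22count0, this]
  | succ k ih =>
    simp [List.replicate_succ, q22count0, ih]

theorem q22count1_run (k : ℕ) (S : List Char) (h : ∀ d ∈ S.head?, d ≠ '1') :
    q22count1 (List.replicate k '1' ++ S) = ((k : Int), S) := by
  induction k with
  | zero =>
    cases S with
    | nil => simp [q22count1]
    | cons c cs =>
      have : c ≠ '1' := h c (by simp)
      simp [q22count1, this]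
  | succ k ih =>
    simp [List.replicate_succ, q22count1, ih]

theorem q22A_cons_one (R : List Char) : q22A ('1' :: R) = q22A R := by
  simp [q22A, q22skip1]

theorem q22B_cons_one (R : List Char) : q22B (q22rle ('1' :: R)) = q22B (q22rle R) := by
  simp only [q22rle]
  cases h : q22rle R with
  | nil => simp [q22consRun, q22B, q22Bdrop, q22Bcore]
  | cons b rest =>
    obtain ⟨c0, n0⟩ := b
    by_cases hc : c0 = '1'
    · simp [q22consRun, hc, q22B, q22Bdrop]
    · have hc' : ¬ c0 = '1' := hc
      simp [q22consRun, hc', q22B, q22Bdrop]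

theorem q22Bcore_head_ne (c0 : Char) (n0 : Int) (rs : List (Char × Int))
    (h : ¬(c0 = '0' ∧ n0 = 1)) : q22Bcore ((c0, n0) :: rs) = true := by
  match rs with
  | [] => rfl
  | [_] => rfl
  | (c1, n1) :: _ :: _ =>
    by_cases h0 : c0 = '0'
    · have hn : n0 ≠ 1 := fun hn => h ⟨h0, hn⟩
      simp [q22Bcore, hn]
    · simp [q22Bcore, h0]

theorem q22Bcore_snd_ne (x : Char × Int) (c1 : Char) (n1 : Int) (rs : List (Char × Int))
    (h : c1 ≠ '1') : q22Bcore (x :: (c1, n1) :: rs) = true := by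
  obtain ⟨c0, n0⟩ := x
  match rs with
  | [] => rfl
  | _ :: _ => simp [q22Bcore, h]

theorem q22_main (R : List Char) : q22A R = q22B (q22rle R) := by
  induction R with
  | nil => simp [q22A, q22skip1, q22rle, q22B, q22Bdrop, q22Bcore]
  | cons a R' ih =>
    by_cases ha : a = '1'
    · subst ha; rw [q22A_cons_one, q22B_cons_one]; exact ih
    · -- head is not '1': A does not skip anything, B does not drop a run
      cases h : q22rle (a :: R') with
      | nil => exact absurd ((q22rle_nil_iff _).mp h) (by simp)
      | cons b rest =>
        obtain ⟨c, n⟩ := b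
        obtain ⟨k, S, hk, hn, hReq, hS, hhd⟩ := q22rle_decomp _ c n rest h
        -- the head char of a :: R' is c
        have hca : c = a := by
          cases k with
          | zero => omega
          | succ k2 =>
            rw [List.replicate_succ] at hReq
            have h2 := congrArg List.head? hReq
            simp only [List.cons_append, List.head?_cons, Option.some.injEq] at h2
            exact h2.symm
        subst hca
        have hskip : q22skip1 (c :: R') = c :: R' := by simp [q22skip1, ha]
        have hdrop : q22Bdrop ((c, n) :: rest) = (c, n) :: rest := by simp [q22Bdrop, ha]
        simp only [q22B]
        rw [hdrop]
        by_cases h0 : c = '0'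
        · -- zeros run of length k
          subst h0
          have hc0 : q22count0 ('0' :: R') = ((k : Int), S) := by
            have := q22count0_run k S hhd; rw [← hReq] at this; exact this
          by_cases hk2 : 2 ≤ k
          · -- zero >= 2: both true
            have : q22A ('0' :: R') = true := by
              have hki : (2 : Int) ≤ (k : Int) := by exact_mod_cast hk2
              simp [q22A, hskip, hc0, hki]
            rw [this, q22Bcore_head_ne]
            intro hh; rw [hn] at hh; omega
          · have hk1 : k = 1 := by omega
            subst hk1
            have hn1 : n = 1 := by simpa using hn
            subst hn1
            cases hS' : S with
            | nil =>
              -- string ends after the single zero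
              have hrest : rest = [] := by rw [← hS, hS']; rfl
              subst hrest
              simp only [q22A, hskip, hc0, hS']
              simp [q22Bcore]
            | cons s S' =>
              -- rest is nonempty
              have hrne : rest ≠ [] := by
                rw [← hS]; rw [hS']; exact (by simpa using q22consRun_ne_nil s (q22rle S'))
              obtain ⟨⟨c1, m⟩, rest2, hrs⟩ : ∃ b rest2, rest = b :: rest2 := by
                cases rest with
                | nil => exact absurd rfl hrne
                | cons b r2 => exact ⟨b, r2, rfl⟩
              subst hrs
              obtain ⟨k1, S2, hk1, hm, hSeq, hS2, hhd2⟩ := q22rle_decomp S c1 m rest2 hS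
              have hc1S : S.head? = some c1 := by
                rw [hSeq]
                cases k1 with
                | zero => omega
                | succ k2 => simp [List.replicate_succ]
              have hc10 : c1 ≠ '0' := by
                have := hhd c1 (by rw [hS'] at hc1S ⊢; simpa using hc1S)
                rw [hS'] at hc1S; exact this
              by_cases hc11 : c1 = '1'
              · subst hc11
                have hc1count : q22count1 S = ((k1 : Int), S2) := by
                  rw [hSeq]; exact q22count1_run k1 S2 hhd2
                cases hS2' : S2 with
                | nil =>
                  have hrest2 : rest2 = [] := by rw [← hS2, hS2']; rfl
                  subst hrest2
                  simp only [q22A, hskip, hc0]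
                  rw [if_neg (by simp), if_neg (by simp [hS']), hc1count, if_pos hS2']
                  simp [q22Bcore]
                | cons t T =>
                  have hrest2 : rest2 ≠ [] := by
                    rw [← hS2, hS2']; exact (by simpa using q22consRun_ne_nil t (q22rle T))
                  obtain ⟨b2, r3, hr3⟩ : ∃ b2 r3, rest2 = b2 :: r3 := by
                    cases rest2 with
                    | nil => exact absurd rfl hrest2
                    | cons b2 r3 => exact ⟨b2, r3, rfl⟩
                  subst hr3
                  simp only [q22A, hskip, hc0]
                  rw [if_neg (by simp), if_neg (by simp [hS']), hc1count,
                      if_neg (by rw [hS2']; simp)]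
                  simp only [q22Bcore]
                  rw [hm]
                  have h2 : (k1 : Int) % 2 = 0 ∨ (k1 : Int) % 2 = 1 := Int.emod_two_eq _
                  rcases h2 with h2 | h2 <;> simp [h2]
              · -- next run is not ones: one = 0, rest nonempty → both true
                have hc1count : q22count1 S = (0, S) := by
                  rw [hS'] at hc1S
                  have : s = c1 := by simpa using hc1S
                  subst this
                  rw [hS']
                  simp [q22count1, hc11]
                simp only [q22A, hskip, hc0]
                rw [if_neg (by simp), if_neg (by simp [hS']), hc1count,
                    if_neg (by simp [hS'])]
                rw [q22Bcore_snd_ne _ _ _ _ hc11]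
                simp
        · -- head is neither '1' nor '0': A returns true through one = 0, B through c0 ≠ '0'
          have hc0 : q22count0 (c :: R') = (0, c :: R') := by simp [q22count0, h0]
          have hc1 : q22count1 (c :: R') = (0, c :: R') := by simp [q22count1, ha]
          simp only [q22A, hskip, hc0]
          rw [if_neg (by simp), if_neg (by simp), hc1, if_neg (by simp)]
          rw [q22Bcore_head_ne c n rest (by intro hh; exact h0 hh.1)]
          simp

-- ===== VERDICT (by name: the statement is the Claim_ definition above) =====
theorem question22_spec : Claim_equal_question22 := by
  intro L _
  unfold Spec_question22
  rw [question22, question22_alt, q22runs_eq, q22_main]
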